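-- pv_equiv track=rewrite | github.com/meraki/dashboard-api-python | generator/generate_snippets.py | process_assignments
-- ===== SOURCE A (Python) =====
-- def snakify(param):
--     ret = ''
--     for s in param:
--         if s.islower():
--             ret += s
--         elif s == '_':
--             ret += '_'
--         else:
--             ret += '_' + s.lower()
--     return ret
--
-- def process_assignments(parameters):
--     text = '\n'
--
--     for k, v in parameters.items():
--         param_name = snakify(k)
--         if param_name == 'id':
--             param_name = 'id_'
--
--         if v == 'list':
--             text += f'{param_name} = []\n'
--         elif v == 'float':
--             text += f'{param_name} = 0.0\n'
--         elif v == 'int':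
--             text += f'{param_name} = 0\n'
--         elif v == 'bool':
--             text += f'{param_name} = False\n'
--         elif v == 'dict':
--             text += f'{param_name} = {{}}\n'
--         elif v == 'str':
--             text += f'{param_name} = \'\'\n'
--         else:
--             if type(v) == str:
--                 value = f'\'{v}\''
--             else:
--                 value = v
--             text += f'{param_name} = {value}\n'
--
--     return text
-- ===== SOURCE B (Python) =====
-- _INIT = {'list': '[]', 'float': '0.0', 'int': '0', 'bool': 'False', 'dict': '{}', 'str': "''"}
--
-- def _snakify(param):
--     if not param:
--         return ''
--     c = param[0]
--     head = c if c.islower() or c == '_' else '_' + c.lower()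
--     return head + _snakify(param[1:])
--
-- def process_assignments(parameters):
--     names = []
--     for k in parameters:
--         n = _snakify(k)
--         names.append('id_' if n == 'id' else n)
--     rhss = [_INIT.get(v, f"'{v}'" if isinstance(v, str) else v)
--             for v in parameters.values()]
--     return '\n' + ''.join(f'{n} = {r}\n' for n, r in zip(names, rhss))
-- ===== Notes on version B (the rewrite author's own statement) =====
-- stated objective: alternative
-- what changed: B is staged instead of one accumulating pass: a recursive snakify, a first pass building the list of fixed-up names, a second pass mapping values through a constant initializer dict (quoted-string fallback), then a zip of the two lists rendered and joined, versus A's single loop appending to a text accumulator through an elif chain.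
import Mathlib
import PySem

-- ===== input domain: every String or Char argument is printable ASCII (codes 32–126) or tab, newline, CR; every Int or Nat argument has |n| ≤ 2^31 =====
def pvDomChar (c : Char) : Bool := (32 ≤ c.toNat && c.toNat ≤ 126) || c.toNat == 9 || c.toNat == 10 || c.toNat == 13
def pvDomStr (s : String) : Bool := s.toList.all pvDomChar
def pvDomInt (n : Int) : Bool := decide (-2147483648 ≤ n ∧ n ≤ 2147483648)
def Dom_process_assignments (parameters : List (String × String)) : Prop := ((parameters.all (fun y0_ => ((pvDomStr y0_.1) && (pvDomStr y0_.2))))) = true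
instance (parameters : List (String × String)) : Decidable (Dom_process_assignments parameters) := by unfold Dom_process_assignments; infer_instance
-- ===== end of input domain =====

-- B is a staged re-decomposition, not faster: recursive snakify, one pass for names, one pass
-- mapping values through a constant initializer table, then zip+join, versus A's single
-- accumulating loop with an elif chain. The dict argument is PySem.Dict.ofList in both ports.

-- ===== PORT A =====
def snakifyA (param : List Char) : List Char :=
  param.foldl (fun ret s =>
    if PySem.Chars.islower s then ret ++ [s]
    else if s = '_' then ret ++ ['_']
    else ret ++ ['_', PySem.Chars.lowerChar s]) []

def process_assignments (parameters : List (String × String)) : String :=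
  String.ofList ((PySem.Dict.ofList parameters).items.foldl (fun text kv =>
    let pn0 := snakifyA kv.1.toList
    let pn := if pn0 = ['i', 'd'] then ['i', 'd', '_'] else pn0
    let v := kv.2
    if v = "list" then text ++ pn ++ " = []\n".toList
    else if v = "float" then text ++ pn ++ " = 0.0\n".toList
    else if v = "int" then text ++ pn ++ " = 0\n".toList
    else if v = "bool" then text ++ pn ++ " = False\n".toList
    else if v = "dict" then text ++ pn ++ " = {}\n".toList
    else if v = "str" then text ++ pn ++ " = \'\'\n".toList
    else
      -- type(v) == str always holds here: v : String
      text ++ pn ++ " = ".toList ++ ('\'' :: v.toList ++ ['\'']) ++ ['\n']) ['\n'])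

-- ===== PORT B =====
def initTableB : PySem.Dict String String :=
  PySem.Dict.ofList [("list", "[]"), ("float", "0.0"), ("int", "0"),
                     ("bool", "False"), ("dict", "{}"), ("str", "''")]

def snakifyB : List Char → List Char
  | [] => []
  | c :: rest =>
      (if PySem.Chars.islower c || c = '_' then [c] else ['_', PySem.Chars.lowerChar c])
        ++ snakifyB rest

def namesB (items : List (String × String)) : List (List Char) :=
  items.map (fun kv =>
    let n := snakifyB kv.1.toList
    if n = "id".toList then "id_".toList else n)

def rhssB (items : List (String × String)) : List (List Char) :=
  items.map (fun kv => (initTableB.getD kv.2 ("'" ++ kv.2 ++ "'")).toList)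

def process_assignments_alt (parameters : List (String × String)) : String :=
  let items := (PySem.Dict.ofList parameters).items
  String.ofList ('\n' ::
    (((namesB items).zip (rhssB items)).map
      (fun nr => nr.1 ++ " = ".toList ++ nr.2 ++ ['\n'])).flatten)

-- ===== PRECONDITION & SPEC =====
def Spec_process_assignments (parameters : List (String × String)) (out : String) : Prop := out = process_assignments_alt parameters
instance (parameters : List (String × String)) (out : String) : Decidable (Spec_process_assignments parameters out) := by unfold Spec_process_assignments; infer_instance

-- ===== CLAIM (what is proved, stated in full; the proofs are below) =====
def Claim_equal_process_assignments : Prop := ∀ (parameters : List (String × String)), Dom_process_assignments parameters → Spec_process_assignments parameters (process_assignments parameters)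

-- ===== LEMMAS AND PROOFS =====

lemma snakify_eq (cs : List Char) : snakifyA cs =
    cs.flatMap (fun s => if PySem.Chars.islower s || s = '_' then [s]
                         else ['_', PySem.Chars.lowerChar s]) := by
  unfold snakifyA
  have hbody : ∀ (ret : List Char) (s : Char),
      (if PySem.Chars.islower s then ret ++ [s]
       else if s = '_' then ret ++ ['_']
       else ret ++ ['_', PySem.Chars.lowerChar s]) =
      ret ++ (if PySem.Chars.islower s || s = '_' then [s]
              else ['_', PySem.Chars.lowerChar s]) := by
    intro ret s
    by_cases h1 : PySem.Chars.islower s <;> by_cases h2 : s = '_' <;> simp [h1, h2]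
  simp only [hbody]
  rw [PySem.List.foldl_append_eq_flatMap]
  simp

lemma snakifyB_flatMap (cs : List Char) : snakifyB cs =
    cs.flatMap (fun s => if PySem.Chars.islower s || s = '_' then [s]
                         else ['_', PySem.Chars.lowerChar s]) := by
  induction cs with
  | nil => rfl
  | cons c rest ih => simp [snakifyB, ih]

def lineAB (kv : String × String) : List Char :=
  (if snakifyB kv.1.toList = "id".toList then "id_".toList else snakifyB kv.1.toList)
    ++ " = ".toList ++ (initTableB.getD kv.2 ("'" ++ kv.2 ++ "'")).toList ++ ['\n']

lemma initTableB_mk : initTableB = PySem.Dict.mk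
    [("list", "[]"), ("float", "0.0"), ("int", "0"),
     ("bool", "False"), ("dict", "{}"), ("str", "''")] := by
  decide

lemma body_eq (text : List Char) (kv : String × String) :
    (let pn0 := snakifyA kv.1.toList
     let pn := if pn0 = ['i', 'd'] then ['i', 'd', '_'] else pn0
     let v := kv.2
     if v = "list" then text ++ pn ++ " = []\n".toList
     else if v = "float" then text ++ pn ++ " = 0.0\n".toList
     else if v = "int" then text ++ pn ++ " = 0\n".toList
     else if v = "bool" then text ++ pn ++ " = False\n".toList
     else if v = "dict" then text ++ pn ++ " = {}\n".toList
     else if v = "str" then text ++ pn ++ " = \'\'\n".toList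
     else text ++ pn ++ " = ".toList ++ ('\'' :: kv.2.toList ++ ['\'']) ++ ['\n']) =
    text ++ lineAB kv := by
  obtain ⟨k, v⟩ := kv
  simp only [lineAB]
  rw [snakify_eq, ← snakifyB_flatMap]
  have hid : ("id" : String).toList = ['i', 'd'] := by decide
  rw [hid]
  by_cases h1 : v = "list"
  · subst h1; by_cases hn : snakifyB k.toList = ['i', 'd'] <;> simp [hn] <;> decide
  by_cases h2 : v = "float"
  · subst h2; by_cases hn : snakifyB k.toList = ['i', 'd'] <;> simp [h1, hn] <;> decide
  by_cases h3 : v = "int"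
  · subst h3; by_cases hn : snakifyB k.toList = ['i', 'd'] <;> simp [h1, h2, hn] <;> decide
  by_cases h4 : v = "bool"
  · subst h4; by_cases hn : snakifyB k.toList = ['i', 'd'] <;> simp [h1, h2, h3, hn] <;> decide
  by_cases h5 : v = "dict"
  · subst h5; by_cases hn : snakifyB k.toList = ['i', 'd'] <;> simp [h1, h2, h3, h4, hn] <;> decide
  by_cases h6 : v = "str"
  · subst h6; by_cases hn : snakifyB k.toList = ['i', 'd'] <;> simp [h1, h2, h3, h4, h5, hn] <;> decide
  · have hget : initTableB.getD v ("'" ++ v ++ "'") = "'" ++ v ++ "'" := by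
      rw [initTableB_mk, PySem.Dict.getD_eq_get?_getD]
      simp [beq_iff_eq, h1, h2, h3, h4, h5, h6, Ne.symm, PySem.Dict.get?]
    rw [hget]
    by_cases hn : snakifyB k.toList = ['i', 'd'] <;> simp [h1, h2, h3, h4, h5, h6, hn]

lemma zip_map_lines (items : List (String × String)) :
    (((namesB items).zip (rhssB items)).map
      (fun nr => nr.1 ++ " = ".toList ++ nr.2 ++ ['\n'])).flatten =
    items.flatMap lineAB := by
  unfold namesB rhssB
  rw [List.zip_map']
  have hf : ((fun nr : List Char × List Char => nr.1 ++ " = ".toList ++ nr.2 ++ ['\n']) ∘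
      fun kv : String × String =>
        (if snakifyB kv.1.toList = "id".toList then "id_".toList else snakifyB kv.1.toList,
          (initTableB.getD kv.2 ("'" ++ kv.2 ++ "'")).toList)) = lineAB := by
    funext kv; rfl
  rw [List.map_map, hf, List.flatMap_def]

theorem process_assignments_spec : Claim_equal_process_assignments := by
  intro parameters _
  unfold Spec_process_assignments process_assignments process_assignments_alt
  congr 1
  simp only [body_eq]
  rw [PySem.List.foldl_append_eq_flatMap, zip_map_lines]; rfl
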